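-- pv_equiv track=rewrite | github.com/vosbek/devos | devos-mvp/src/approval/risk_assessment.py | _extract_main_command
-- ===== SOURCE A (Python) =====
-- def _extract_main_command(command: str) -> str:
--     """Extract the main command from a complex command line"""
--
--     # Clean the command
--     command = command.strip()
--
--     # Remove sudo if present
--     if command.startswith('sudo '):
--         command = command[5:].strip()
--
--     # Split on pipes and take the first part
--     if '|' in command:
--         command = command.split('|')[0].strip()
--
--     # Split on redirections
--     for redirect in ['>', '>>', '<']:
--         if redirect in command:
--             command = command.split(redirect)[0].strip()
--
--     # Extract the first word
--     parts = command.split()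
--     if parts:
--         return parts[0]
--
--     return ''
-- ===== SOURCE B (Python) =====
-- def _extract_main_command(command: str) -> str:
--     """Extract the main command from a complex command line"""
--     command = command.strip()
--     if command.startswith('sudo '):
--         command = command[5:]
--     # one pass: keep everything before the first pipe/redirection character
--     head = []
--     for ch in command:
--         if ch in '|><':
--             break
--         head.append(ch)
--     parts = ''.join(head).split()
--     return parts[0] if parts else ''
-- ===== Notes on version B (the rewrite author's own statement) =====
-- stated objective: simpler
-- what changed: Replaces the four conditional split-at-delimiter-take-[0]-and-restrip stages with a single left-to-right scan that truncates the command at the first '|', '>' or '<' before taking the first whitespace token.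
import Mathlib
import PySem

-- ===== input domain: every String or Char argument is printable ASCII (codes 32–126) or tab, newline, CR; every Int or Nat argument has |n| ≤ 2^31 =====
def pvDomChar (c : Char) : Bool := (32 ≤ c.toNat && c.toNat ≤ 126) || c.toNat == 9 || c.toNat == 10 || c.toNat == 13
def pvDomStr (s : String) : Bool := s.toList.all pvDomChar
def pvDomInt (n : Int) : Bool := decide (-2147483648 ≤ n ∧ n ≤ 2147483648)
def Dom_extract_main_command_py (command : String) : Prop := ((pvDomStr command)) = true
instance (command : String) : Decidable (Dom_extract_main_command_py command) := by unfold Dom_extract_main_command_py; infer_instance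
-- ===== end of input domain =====

-- B replaces A's four conditional split-at-delimiter/take-[0]/re-strip stages by one scan that
-- truncates at the first '|', '>' or '<' before taking the first whitespace token (simpler; same result).

-- ===== PORT A =====
-- the body of A's for-loop over ['>', '>>', '<']
def pyStage (cs : List Char) (r : List Char) : List Char :=
  if PySem.Chars.isIn r cs then PySem.Chars.strip ((PySem.Chars.splitOn cs r).headD []) else cs

def extract_main_command_py (command : String) : String :=
  let cs := PySem.Chars.strip command.toList
  let cs := if PySem.Chars.startswith cs ['s','u','d','o',' '] then
      PySem.Chars.strip (PySem.Chars.slice cs (some 5) none) else cs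
  let cs := if PySem.Chars.isIn ['|'] cs then
      PySem.Chars.strip ((PySem.Chars.splitOn cs ['|']).headD []) else cs
  let cs := List.foldl pyStage cs [['>'], ['>','>'], ['<']]
  match PySem.Chars.split₀ cs with
  | [] => ""
  | p :: _ => String.ofList p

-- ===== PORT B =====
def extract_main_command_py_alt (command : String) : String :=
  let cs := PySem.Chars.strip command.toList
  let cs := if PySem.Chars.startswith cs ['s','u','d','o',' '] then
      PySem.Chars.slice cs (some 5) none else cs
  let head := cs.takeWhile (fun c => !(c == '|' || c == '>' || c == '<'))
  match PySem.Chars.split₀ head with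
  | [] => ""
  | p :: _ => String.ofList p

-- ===== PRECONDITION & SPEC =====
def Spec_extract_main_command_py (command : String) (out : String) : Prop := out = extract_main_command_py_alt command
instance (command : String) (out : String) : Decidable (Spec_extract_main_command_py command out) := by unfold Spec_extract_main_command_py; infer_instance

-- ===== CLAIM (what is proved, stated in full; the proofs are below) =====
def Claim_equal_extract_main_command_py : Prop := ∀ (command : String), Dom_extract_main_command_py command → Spec_extract_main_command_py command (extract_main_command_py command)

-- ===== LEMMAS AND PROOFS =====

theorem split0_go_ws_prefix (w s : List Char) (acc : List (List Char))
    (hw : ∀ c ∈ w, PySem.Chars.isspace c = true) :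
    PySem.Chars.split₀.go (w ++ s) [] acc = PySem.Chars.split₀.go s [] acc := by
  induction w with
  | nil => rfl
  | cons c w ih =>
    have hc := hw c (by simp)
    simp only [List.cons_append, PySem.Chars.split₀.go, hc, if_pos, List.isEmpty_nil]
    exact ih (fun c hc => hw c (by simp [hc]))

theorem split0_go_allws (w : List Char) (cur : List Char) (acc : List (List Char))
    (hw : ∀ c ∈ w, PySem.Chars.isspace c = true) :
    PySem.Chars.split₀.go w cur acc = PySem.Chars.split₀.go [] cur acc := by
  induction w generalizing cur acc with
  | nil => rfl
  | cons c w ih =>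
    have hc := hw c (by simp)
    have ih' := fun cur acc => ih cur acc (fun c hc => hw c (by simp [hc]))
    by_cases hcur : cur = []
    · subst hcur
      simp only [PySem.Chars.split₀.go, hc, List.isEmpty_nil, if_true, ih']
    · simp only [PySem.Chars.split₀.go, hc, List.isEmpty_iff, hcur, if_false, ih', if_true,
        List.isEmpty_nil, List.reverse_cons]

theorem split0_go_ws_suffix (s w : List Char) (cur : List Char) (acc : List (List Char))
    (hw : ∀ c ∈ w, PySem.Chars.isspace c = true) :
    PySem.Chars.split₀.go (s ++ w) cur acc = PySem.Chars.split₀.go s cur acc := by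
  induction s generalizing cur acc with
  | nil => simpa using split0_go_allws w cur acc hw
  | cons c s ih =>
    by_cases hc : PySem.Chars.isspace c = true
    · by_cases hcur : cur = []
      · subst hcur
        simp only [List.cons_append, PySem.Chars.split₀.go, hc, List.isEmpty_nil, if_true, ih]
      · simp only [List.cons_append, PySem.Chars.split₀.go, hc, List.isEmpty_iff, hcur, if_false,
          if_true, ih]
    · simp only [List.cons_append, PySem.Chars.split₀.go, hc, if_false, ih]

theorem splitOn_go_acc (sep : List Char) (fuel : Nat) (s cur : List Char) (acc : List (List Char)) :
    PySem.Chars.splitOn.go sep fuel s cur acc = acc.reverse ++ PySem.Chars.splitOn.go sep fuel s cur [] := by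
  induction fuel generalizing s cur acc with
  | zero => simp [PySem.Chars.splitOn.go]
  | succ fuel ih =>
    cases s with
    | nil => simp [PySem.Chars.splitOn.go]
    | cons c rest =>
      by_cases hp : sep.isPrefixOf (c :: rest) = true
      · simp only [PySem.Chars.splitOn.go, hp, if_true]
        rw [ih _ _ (cur.reverse :: acc), ih _ _ [cur.reverse]]
        simp
      · simp only [PySem.Chars.splitOn.go, hp, Bool.false_eq_true, if_false]
        rw [ih rest (c :: cur) acc]

theorem splitOn_go_single_head (c : Char) (fuel : Nat) (s cur : List Char) (h : s.length < fuel) :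
    (PySem.Chars.splitOn.go [c] fuel s cur []).headD [] = cur.reverse ++ s.takeWhile (fun x => x != c) := by
  induction fuel generalizing s cur with
  | zero => omega
  | succ fuel ih =>
    cases s with
    | nil => simp [PySem.Chars.splitOn.go]
    | cons c' rest =>
      by_cases hp : [c].isPrefixOf (c' :: rest) = true
      · have hc : c' = c := by
          have : c = c' ∧ [].isPrefixOf rest = true := by
            simpa [List.isPrefixOf] using hp
          exact this.1.symm
        simp only [PySem.Chars.splitOn.go, hp, if_true]
        rw [splitOn_go_acc]
        simp [hc]
      · have hc : ¬ c' = c := by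
          intro hcc; exact hp (by simp [List.isPrefixOf, hcc])
        simp only [PySem.Chars.splitOn.go, hp, Bool.false_eq_true, if_false]
        rw [ih rest (c' :: cur) (by simp at h ⊢; omega)]
        simp [bne, hc]

theorem split0_ws_prefix (w s : List Char) (hw : ∀ c ∈ w, PySem.Chars.isspace c = true) :
    PySem.Chars.split₀ (w ++ s) = PySem.Chars.split₀ s := by
  unfold PySem.Chars.split₀
  exact split0_go_ws_prefix w s [] hw

theorem split0_ws_suffix (s w : List Char) (hw : ∀ c ∈ w, PySem.Chars.isspace c = true) :
    PySem.Chars.split₀ (s ++ w) = PySem.Chars.split₀ s := by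
  unfold PySem.Chars.split₀
  exact split0_go_ws_suffix s w [] [] hw

theorem splitOn_single_head (s : List Char) (c : Char) :
    (PySem.Chars.splitOn s [c]).headD [] = s.takeWhile (fun x => x != c) := by
  unfold PySem.Chars.splitOn
  simpa using splitOn_go_single_head c (s.length + 1) s [] (by omega)

theorem strip_infix (s : List Char) : PySem.Chars.strip s <:+: s := by
  unfold PySem.Chars.strip PySem.Chars.lstrip PySem.Chars.rstrip
  have h1 : (List.dropWhile PySem.Chars.isspace (List.dropWhile PySem.Chars.isspace s).reverse).reverse <+:
      List.dropWhile PySem.Chars.isspace s := by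
    have h0 := List.dropWhile_suffix (l := (List.dropWhile PySem.Chars.isspace s).reverse) PySem.Chars.isspace
    have h2 : ((List.dropWhile PySem.Chars.isspace (List.dropWhile PySem.Chars.isspace s).reverse).reverse).reverse <:+
        ((List.dropWhile PySem.Chars.isspace s)).reverse := by simpa using h0
    exact List.reverse_suffix.mp (by simpa using h2)
  exact h1.isInfix.trans (List.dropWhile_suffix PySem.Chars.isspace).isInfix

theorem split0_takeWhile_rstrip (p : Char → Bool) (r : List Char) :
    PySem.Chars.split₀ ((PySem.Chars.rstrip r).takeWhile p) = PySem.Chars.split₀ (r.takeWhile p) := by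
  have hdecomp : r = PySem.Chars.rstrip r ++ (List.takeWhile PySem.Chars.isspace r.reverse).reverse := by
    unfold PySem.Chars.rstrip
    rw [← List.reverse_append, List.takeWhile_append_dropWhile, List.reverse_reverse]
  have hb : ∀ c ∈ (List.takeWhile PySem.Chars.isspace r.reverse).reverse, PySem.Chars.isspace c = true := by
    intro c hc
    exact List.mem_takeWhile_imp (by simpa using hc)
  conv_rhs => rw [hdecomp]
  rw [List.takeWhile_append]
  by_cases hlen : (List.takeWhile p (PySem.Chars.rstrip r)).length = (PySem.Chars.rstrip r).length
  · have heq : List.takeWhile p (PySem.Chars.rstrip r) = PySem.Chars.rstrip r :=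
      (List.takeWhile_prefix p).eq_of_length hlen
    rw [if_pos hlen, heq]
    rw [split0_ws_suffix]
    intro c hc
    exact hb c (List.takeWhile_subset _ hc)
  · rw [if_neg hlen]

theorem split0_takeWhile_strip (p : Char → Bool) (hp : ∀ c, PySem.Chars.isspace c = true → p c = true)
    (s : List Char) :
    PySem.Chars.split₀ ((PySem.Chars.strip s).takeWhile p) = PySem.Chars.split₀ (s.takeWhile p) := by
  have hls : PySem.Chars.strip s = PySem.Chars.rstrip (PySem.Chars.lstrip s) := rfl
  rw [hls, split0_takeWhile_rstrip p]
  have hdecomp : s = List.takeWhile PySem.Chars.isspace s ++ PySem.Chars.lstrip s :=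
    (List.takeWhile_append_dropWhile).symm
  conv_rhs => rw [hdecomp]
  rw [List.takeWhile_append]
  have hw : ∀ c ∈ List.takeWhile PySem.Chars.isspace s, p c = true := by
    intro c hc
    exact hp c (List.mem_takeWhile_imp hc)
  have hself : List.takeWhile p (List.takeWhile PySem.Chars.isspace s) = List.takeWhile PySem.Chars.isspace s :=
    List.takeWhile_eq_self_iff.mpr hw
  rw [if_pos (by rw [hself])]
  rw [split0_ws_prefix]
  intro c hc
  exact List.mem_takeWhile_imp hc

theorem isIn_singleton (c : Char) (s : List Char) :
    PySem.Chars.isIn [c] s = true ↔ c ∈ s := by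
  rw [PySem.Chars.isIn_iff_infix]; exact List.singleton_infix_iff c s

theorem stage_eq (q : Char → Bool) (hq : ∀ c, PySem.Chars.isspace c = true → q c = true)
    (c : Char) (s : List Char) :
    PySem.Chars.split₀ ((if PySem.Chars.isIn [c] s then
        PySem.Chars.strip ((PySem.Chars.splitOn s [c]).headD []) else s).takeWhile q)
      = PySem.Chars.split₀ (s.takeWhile fun x => q x && x != c) := by
  have hmerge : List.takeWhile q (List.takeWhile (fun x => x != c) s)
      = List.takeWhile (fun x => q x && x != c) s := by
    rw [List.takeWhile_takeWhile]
    congr 1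
    funext a
    by_cases h : a = c <;> simp [h, bne]
  by_cases hin : PySem.Chars.isIn [c] s = true
  · rw [if_pos hin, splitOn_single_head, split0_takeWhile_strip q hq, hmerge]
  · rw [if_neg hin]
    have hnot : c ∉ s := fun hm => hin ((isIn_singleton c s).mpr hm)
    have hself : List.takeWhile (fun x => x != c) s = s :=
      List.takeWhile_eq_self_iff.mpr (fun a ha => by
        simp [bne]
        exact fun he => hnot (he ▸ ha))
    rw [← hmerge, hself]

theorem not_mem_stage (c : Char) (s : List Char) :
    c ∉ (if PySem.Chars.isIn [c] s then
        PySem.Chars.strip ((PySem.Chars.splitOn s [c]).headD []) else s) := by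
  by_cases hin : PySem.Chars.isIn [c] s = true
  · rw [if_pos hin, splitOn_single_head]
    intro hm
    have hm2 : c ∈ List.takeWhile (fun x => x != c) s :=
      (strip_infix _).subset hm
    have := List.mem_takeWhile_imp hm2
    simp at this
  · rw [if_neg hin]
    exact fun hm => hin ((isIn_singleton c s).mpr hm)

theorem main_eq (command : String) : extract_main_command_py command = extract_main_command_py_alt command := by
  unfold extract_main_command_py extract_main_command_py_alt
  simp only [List.foldl_cons, List.foldl_nil, pyStage]
  set t := PySem.Chars.strip command.toList with ht
  set uA := (if PySem.Chars.startswith t ['s','u','d','o',' '] then PySem.Chars.strip (PySem.Chars.slice t (some 5) none) else t) with huA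
  set uB := (if PySem.Chars.startswith t ['s','u','d','o',' '] then PySem.Chars.slice t (some 5) none else t) with huB
  set v1 := (if PySem.Chars.isIn ['|'] uA then PySem.Chars.strip ((PySem.Chars.splitOn uA ['|']).headD []) else uA) with hv1
  set v2 := (if PySem.Chars.isIn ['>'] v1 then PySem.Chars.strip ((PySem.Chars.splitOn v1 ['>']).headD []) else v1) with hv2
  set v2' := (if PySem.Chars.isIn ['>','>'] v2 then PySem.Chars.strip ((PySem.Chars.splitOn v2 ['>','>']).headD []) else v2) with hv2'
  set v3 := (if PySem.Chars.isIn ['<'] v2' then PySem.Chars.strip ((PySem.Chars.splitOn v2' ['<']).headD []) else v2') with hv3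
  -- the '>>' stage never fires: after the '>' stage no '>' is left
  have h22 : v2' = v2 := by
    rw [hv2']
    have hno : '>' ∉ v2 := not_mem_stage '>' v1
    have hfalse : PySem.Chars.isIn ['>','>'] v2 = false := by
      cases hii : PySem.Chars.isIn ['>','>'] v2 with
      | false => rfl
      | true =>
        exact absurd ((PySem.Chars.isIn_iff_infix _ _).mp hii).subset (by simp [hno])
    rw [hfalse]
    simp
  have hlt : ∀ (d : Char), PySem.Chars.isspace d = false →
      ∀ c, PySem.Chars.isspace c = true → (c != d) = true := by
    intro d hd c hc
    by_cases h : c = d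
    · subst h; rw [hc] at hd; exact absurd hd (by simp)
    · simp [bne, h]
  have hq0 : ∀ c, PySem.Chars.isspace c = true → (fun _ : Char => true) c = true := fun _ _ => rfl
  have hq1 : ∀ c, PySem.Chars.isspace c = true → (fun x : Char => true && x != '<') c = true := by
    intro c hc; simp [hlt '<' (by decide) c hc]
  have hq2 : ∀ c, PySem.Chars.isspace c = true → (fun x : Char => (true && x != '<') && x != '>') c = true := by
    intro c hc; simp [hlt '<' (by decide) c hc, hlt '>' (by decide) c hc]
  have hq3 : ∀ c, PySem.Chars.isspace c = true → (fun x : Char => ((true && x != '<') && x != '>') && x != '|') c = true := by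
    intro c hc; simp [hlt '<' (by decide) c hc, hlt '>' (by decide) c hc, hlt '|' (by decide) c hc]
  have key : PySem.Chars.split₀ v3 = PySem.Chars.split₀ (uB.takeWhile (fun c => !(c == '|' || c == '>' || c == '<'))) := by
    calc PySem.Chars.split₀ v3
        = PySem.Chars.split₀ (v3.takeWhile (fun _ => true)) := by
          rw [List.takeWhile_eq_self_iff.mpr (fun a _ => rfl)]
      _ = PySem.Chars.split₀ (v2'.takeWhile (fun x => true && x != '<')) := by
          rw [hv3]; exact stage_eq (fun _ => true) hq0 '<' v2'
      _ = PySem.Chars.split₀ (v1.takeWhile (fun x => (true && x != '<') && x != '>')) := by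
          rw [h22, hv2]; exact stage_eq (fun x => true && x != '<') hq1 '>' v1
      _ = PySem.Chars.split₀ (uA.takeWhile (fun x => ((true && x != '<') && x != '>') && x != '|')) := by
          rw [hv1]; exact stage_eq (fun x => (true && x != '<') && x != '>') hq2 '|' uA
      _ = PySem.Chars.split₀ (uB.takeWhile (fun x => ((true && x != '<') && x != '>') && x != '|')) := by
          rw [huA, huB]
          by_cases hs : PySem.Chars.startswith t ['s','u','d','o',' '] = true
          · rw [if_pos hs, if_pos hs]
            exact split0_takeWhile_strip _ hq3 _
          · rw [if_neg hs, if_neg hs]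
      _ = PySem.Chars.split₀ (uB.takeWhile (fun c => !(c == '|' || c == '>' || c == '<'))) := by
          have hpred : (fun x : Char => ((true && x != '<') && x != '>') && x != '|')
              = (fun c : Char => !(c == '|' || c == '>' || c == '<')) := by
            funext x
            cases h1 : (x == '|') <;> cases h2 : (x == '>') <;> cases h3 : (x == '<') <;>
              simp [bne, h1, h2, h3]
          rw [hpred]
  rw [key]

-- ===== VERDICT (by name: the statement is the Claim_ definition above) =====
theorem extract_main_command_py_spec : Claim_equal_extract_main_command_py := by
  intro command _
  unfold Spec_extract_main_command_py
  exact main_eq command
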